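-- pv_equiv track=rewrite | github.com/songsofdawn/wheat_genes_operation | scripts/split_sqlite_db.py | detect_gene_column
-- ===== SOURCE A (Python) =====
-- def detect_gene_column(columns):
--     """
--     尽量自动识别哪个字段是基因 ID。
--     兼容你之前数据库里出现过的字段名。
--     """
--     candidates = [
--         "gene_id",
--         "primary_gene_id",
--         "gene",
--         "gene.name",
--         "cs_gene_id",
--         "fielder_gene_id",
--         "self_homolog_gene_id",
--         "homolog_gene_id",
--         "transcript_id",
--     ]
--
--     for c in candidates:
--         if c in columns:
--             return c
--
--     # 兜底：找包含 gene 和 id 的列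
--     for c in columns:
--         lc = c.lower()
--         if "gene" in lc and "id" in lc:
--             return c
--
--     # 再兜底：找包含 gene 的列
--     for c in columns:
--         if "gene" in c.lower():
--             return c
--
--     return None
-- ===== SOURCE B (Python) =====
-- def detect_gene_column(columns):
--     """Single pass: give each matching column a tiered priority key, take the minimum."""
--     candidates = [
--         "gene_id",
--         "primary_gene_id",
--         "gene",
--         "gene.name",
--         "cs_gene_id",
--         "fielder_gene_id",
--         "self_homolog_gene_id",
--         "homolog_gene_id",
--         "transcript_id",
--     ]
--
--     keyed = []
--     for i, c in enumerate(columns):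
--         if c in candidates:
--             keyed.append(((0, candidates.index(c)), c))
--         elif "gene" in c.lower() and "id" in c.lower():
--             keyed.append(((1, i), c))
--         elif "gene" in c.lower():
--             keyed.append(((2, i), c))
--     if not keyed:
--         return None
--     return min(keyed, key=lambda t: t[0])[1]
-- ===== Notes on version B (the rewrite author's own statement) =====
-- stated objective: alternative
-- what changed: A's three sequential scans (candidate list, then gene+id fallback, then gene fallback) are replaced by a single enumerate pass that assigns each matching column a tiered priority key ((0,candidate-index), (1,position), (2,position)) and returns the min-by-key column.
import Mathlib
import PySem

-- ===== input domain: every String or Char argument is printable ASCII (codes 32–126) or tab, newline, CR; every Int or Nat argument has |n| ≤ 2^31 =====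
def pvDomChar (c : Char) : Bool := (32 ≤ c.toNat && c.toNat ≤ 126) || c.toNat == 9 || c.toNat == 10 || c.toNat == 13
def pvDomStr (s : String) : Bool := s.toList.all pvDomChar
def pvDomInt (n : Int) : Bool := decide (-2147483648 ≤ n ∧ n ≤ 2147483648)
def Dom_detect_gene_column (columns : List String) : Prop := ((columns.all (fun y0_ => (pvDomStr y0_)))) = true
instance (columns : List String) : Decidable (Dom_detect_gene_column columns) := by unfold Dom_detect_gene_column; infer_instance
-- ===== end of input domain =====

-- B replaces A's three ordered scans by one keyed pass: each matching column gets a tiered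
-- priority key and min-by-key selects the answer (alternative decomposition, same cost).

-- ===== PORT A =====
def pvCandidates : List String :=
  ["gene_id", "primary_gene_id", "gene", "gene.name", "cs_gene_id",
   "fielder_gene_id", "self_homolog_gene_id", "homolog_gene_id", "transcript_id"]

-- 'for c in candidates: if c in columns: return c'
def pvLoop1 : List String → List String → Option String
  | [], _ => none
  | c :: rest, columns => if columns.contains c then some c else pvLoop1 rest columns

-- 'for c in columns: lc = c.lower(); if "gene" in lc and "id" in lc: return c'
def pvLoop2 : List String → Option String
  | [] => none
  | c :: rest =>
    let lc := PySem.Str.lower c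
    if PySem.Str.isIn "gene" lc && PySem.Str.isIn "id" lc then some c else pvLoop2 rest

-- 'for c in columns: if "gene" in c.lower(): return c'
def pvLoop3 : List String → Option String
  | [] => none
  | c :: rest =>
    if PySem.Str.isIn "gene" (PySem.Str.lower c) then some c else pvLoop3 rest

def detect_gene_column (columns : List String) : Option String :=
  match pvLoop1 pvCandidates columns with
  | some c => some c
  | none =>
    match pvLoop2 columns with
    | some c => some c
    | none => pvLoop3 columns

-- ===== PORT B =====
-- Source B's key(i, c): the tiered priority key, or None when the column does not match
def pvKeyB (i : Int) (c : String) : Option (Int × Int) :=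
  if pvCandidates.contains c then
    -- candidates.index(c): guarded by the membership test, so .getD is never taken
    some (0, (((PySem.List.index? pvCandidates c).getD 0 : Nat) : Int))
  else if PySem.Str.isIn "gene" (PySem.Str.lower c) && PySem.Str.isIn "id" (PySem.Str.lower c) then
    some (1, i)
  else if PySem.Str.isIn "gene" (PySem.Str.lower c) then some (2, i)
  else none

def detect_gene_column_alt (columns : List String) : Option String :=
  -- keyed = [(k, c) for i, c in enumerate(columns) if (k := key(i, c)) is not None]
  let keyed := (PySem.List.enumerate columns 0).filterMap
    (fun p => (pvKeyB p.1 p.2).map (fun k => (k, p.2)))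
  -- min(keyed, key=lambda t: t[0])[1], or None when keyed is empty
  match PySem.List.min2? keyed (fun t => t.1.1) (fun t => t.1.2) with
  | some t => some t.2
  | none => none

-- ===== PRECONDITION & SPEC =====
def Spec_detect_gene_column (columns : List String) (out : Option String) : Prop := out = detect_gene_column_alt columns
instance (columns : List String) (out : Option String) : Decidable (Spec_detect_gene_column columns out) := by unfold Spec_detect_gene_column; infer_instance

-- ===== CLAIM (what is proved, stated in full; the proofs are below) =====
def Claim_equal_detect_gene_column : Prop := ∀ (columns : List String), Dom_detect_gene_column columns → Spec_detect_gene_column columns (detect_gene_column columns)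

-- ===== LEMMAS AND PROOFS =====

-- the two fallback predicates of both programs
def pvP2 (c : String) : Bool :=
  PySem.Str.isIn "gene" (PySem.Str.lower c) && PySem.Str.isIn "id" (PySem.Str.lower c)
def pvP3 (c : String) : Bool := PySem.Str.isIn "gene" (PySem.Str.lower c)

-- lexicographic ≤ on priority keys (Python's tuple order)
def pvLe (a b : Int × Int) : Prop := a.1 < b.1 ∨ (a.1 = b.1 ∧ a.2 ≤ b.2)

theorem pvLoop1_eq_find (cs columns : List String) :
    pvLoop1 cs columns = cs.find? (fun c => columns.contains c) := by
  induction cs with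
  | nil => rfl
  | cons c rest ih =>
    have hdef : pvLoop1 (c :: rest) columns
        = if columns.contains c then some c else pvLoop1 rest columns := rfl
    rw [hdef]
    cases h : columns.contains c
    · rw [if_neg (by decide), List.find?_cons_of_neg (Bool.eq_false_iff.mp h), ih]
    · rw [if_pos (by decide), List.find?_cons_of_pos h]

theorem pvLoop2_eq_find (columns : List String) :
    pvLoop2 columns = columns.find? pvP2 := by
  induction columns with
  | nil => rfl
  | cons c rest ih =>
    have hdef : pvLoop2 (c :: rest) = if pvP2 c then some c else pvLoop2 rest := rfl
    rw [hdef]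
    cases h : pvP2 c
    · rw [if_neg (by simp [h]), List.find?_cons_of_neg (by simp [h]), ih]
    · rw [if_pos (by simp [h]), List.find?_cons_of_pos (by simp [h])]

theorem pvLoop3_eq_find (columns : List String) :
    pvLoop3 columns = columns.find? pvP3 := by
  induction columns with
  | nil => rfl
  | cons c rest ih =>
    have hdef : pvLoop3 (c :: rest) = if pvP3 c then some c else pvLoop3 rest := rfl
    rw [hdef]
    cases h : pvP3 c
    · rw [if_neg (by simp [h]), List.find?_cons_of_neg (by simp [h]), ih]
    · rw [if_pos (by simp [h]), List.find?_cons_of_pos (by simp [h])]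

theorem pvMem_enum {α : Type} {xs : List α} {s i : Int} {c : α} :
    (i, c) ∈ PySem.List.enumerate xs s ↔
      ∃ (j : Nat) (hj : j < xs.length), i = s + j ∧ xs[j] = c := by
  induction xs generalizing s with
  | nil => simp [PySem.List.enumerate]
  | cons x t ih =>
    rw [PySem.List.enumerate_cons]
    constructor
    · intro h
      rcases List.mem_cons.mp h with h | h
      · refine ⟨0, by simp, ?_, ?_⟩
        · simpa using congrArg Prod.fst h
        · simpa using (congrArg Prod.snd h).symm
      · rcases ih.mp h with ⟨j, hj, hi, hc⟩
        exact ⟨j + 1, by simpa using hj, by omega, by simpa using hc⟩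
    · rintro ⟨j, hj, hi, hc⟩
      cases j with
      | zero =>
        simp at hi hc
        exact List.mem_cons.mpr (Or.inl (by simp [hi, hc]))
      | succ j =>
        refine List.mem_cons.mpr (Or.inr (ih.mpr
          ⟨j, (by simp at hj; omega), (by omega), (by simpa using hc)⟩))

-- the case analysis of Source B's key function
theorem pvKeyB_cases {i : Int} {c : String} {k : Int × Int} (h : pvKeyB i c = some k) :
    (pvCandidates.contains c = true ∧
      ∃ n : Nat, PySem.List.index? pvCandidates c = some n ∧ k = (0, (n : Int)))
    ∨ (pvCandidates.contains c = false ∧ pvP2 c = true ∧ k = (1, i))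
    ∨ (pvCandidates.contains c = false ∧ pvP2 c = false ∧ pvP3 c = true ∧ k = (2, i)) := by
  unfold pvKeyB at h
  by_cases h0 : pvCandidates.contains c = true
  · rw [if_pos h0] at h
    left
    have hmem : c ∈ pvCandidates := by simpa using h0
    obtain ⟨n, hn⟩ := Option.isSome_iff_exists.mp ((PySem.List.index?_isSome_iff _ _).mpr hmem)
    refine ⟨h0, n, hn, ?_⟩
    rw [hn] at h
    simpa using h.symm
  · rw [if_neg h0] at h
    by_cases hb : (PySem.Str.isIn "gene" (PySem.Str.lower c)
        && PySem.Str.isIn "id" (PySem.Str.lower c)) = true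
    · rw [if_pos hb] at h
      right; left
      exact ⟨Bool.eq_false_iff.mpr h0, (by unfold pvP2; exact hb), by simpa using h.symm⟩
    · rw [if_neg hb] at h
      by_cases hcq : PySem.Str.isIn "gene" (PySem.Str.lower c) = true
      · rw [if_pos hcq] at h
        right; right
        exact ⟨Bool.eq_false_iff.mpr h0, (by unfold pvP2; exact Bool.eq_false_iff.mpr hb),
          (by unfold pvP3; exact hcq), by simpa using h.symm⟩
      · rw [if_neg hcq] at h
        exact absurd h (by simp)

-- the fold performed by min2? on the keyed list
def pvStep (acc : Option ((Int × Int) × String)) (x : (Int × Int) × String) :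
    Option ((Int × Int) × String) :=
  match acc with
  | none => some x
  | some m =>
    if (decide (x.1.1 < m.1.1) || !decide (m.1.1 < x.1.1) && decide (x.1.2 < m.1.2)) then some x
    else some m

theorem pvMin2_eq (l : List ((Int × Int) × String)) :
    PySem.List.min2? l (fun t => t.1.1) (fun t => t.1.2) = List.foldl pvStep none l := by
  unfold PySem.List.min2?
  congr 1
  funext acc x
  cases acc with
  | none => rfl
  | some m => rfl

theorem pvGo (l : List ((Int × Int) × String)) (m0 : (Int × Int) × String) :
    ∃ m, List.foldl pvStep (some m0) l = some m ∧ (m = m0 ∨ m ∈ l) ∧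
      pvLe m.1 m0.1 ∧ ∀ y ∈ l, pvLe m.1 y.1 := by
  induction l generalizing m0 with
  | nil =>
    exact ⟨m0, rfl, Or.inl rfl, (by unfold pvLe; right; exact ⟨rfl, le_refl _⟩), by simp⟩
  | cons x t ih =>
    rw [List.foldl_cons]
    have hs : pvStep (some m0) x =
        if (decide (x.1.1 < m0.1.1) || !decide (m0.1.1 < x.1.1) && decide (x.1.2 < m0.1.2))
        then some x else some m0 := rfl
    by_cases hx : (decide (x.1.1 < m0.1.1) || !decide (m0.1.1 < x.1.1) && decide (x.1.2 < m0.1.2)) = true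
    · rw [hs, if_pos hx]
      obtain ⟨m, hm, hmem, hle, hall⟩ := ih x
      have hxlt : pvLe x.1 m0.1 := by
        simp only [Bool.or_eq_true, Bool.and_eq_true, Bool.not_eq_true',
          decide_eq_true_eq, decide_eq_false_iff_not] at hx
        unfold pvLe; omega
      refine ⟨m, hm, ?_, ?_, ?_⟩
      · rcases hmem with h | h
        · exact Or.inr (List.mem_cons.mpr (Or.inl h))
        · exact Or.inr (List.mem_cons_of_mem _ h)
      · unfold pvLe at hle hxlt ⊢; omega
      · intro y hy
        rcases List.mem_cons.mp hy with h | h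
        · exact h ▸ hle
        · exact hall y h
    · rw [hs, if_neg hx]
      obtain ⟨m, hm, hmem, hle, hall⟩ := ih m0
      have hxge : pvLe m0.1 x.1 := by
        simp only [Bool.or_eq_true, Bool.and_eq_true, Bool.not_eq_true',
          decide_eq_true_eq, decide_eq_false_iff_not] at hx
        unfold pvLe; omega
      refine ⟨m, hm, ?_, hle, ?_⟩
      · rcases hmem with h | h
        · exact Or.inl h
        · exact Or.inr (List.mem_cons_of_mem _ h)
      · intro y hy
        rcases List.mem_cons.mp hy with h | h
        · subst h; unfold pvLe at hle hxge ⊢; omega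
        · exact hall y h

theorem pvMin2_spec (l : List ((Int × Int) × String)) (hne : l ≠ []) :
    ∃ m, PySem.List.min2? l (fun t => t.1.1) (fun t => t.1.2) = some m ∧
      m ∈ l ∧ ∀ y ∈ l, pvLe m.1 y.1 := by
  cases l with
  | nil => exact absurd rfl hne
  | cons x t =>
    rw [pvMin2_eq, List.foldl_cons]
    have hx : pvStep none x = some x := rfl
    rw [hx]
    rcases pvGo t x with ⟨m, hm, hmem, hle, hall⟩
    refine ⟨m, hm, ?_, ?_⟩
    · rcases hmem with h | h
      · exact h ▸ List.mem_cons_self ..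
      · exact List.mem_cons_of_mem _ h
    · intro y hy
      rcases List.mem_cons.mp hy with h | h
      · exact h ▸ hle
      · exact hall y h

theorem pvLe_antisymm {a b : Int × Int} (h1 : pvLe a b) (h2 : pvLe b a) : a = b := by
  unfold pvLe at h1 h2
  have : a.1 = b.1 ∧ a.2 = b.2 := by omega
  exact Prod.ext this.1 this.2

-- membership facts about the keyed list
theorem pvKeyed_mem {columns : List String} {t : (Int × Int) × String}
    (ht : t ∈ (PySem.List.enumerate columns 0).filterMap
      (fun p => (pvKeyB p.1 p.2).map (fun k => (k, p.2)))) :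
    ∃ (j : Nat) (hj : j < columns.length),
      columns[j] = t.2 ∧ pvKeyB (j : Int) t.2 = some t.1 := by
  rcases List.mem_filterMap.mp ht with ⟨⟨i, c⟩, hp, hf⟩
  rcases Option.map_eq_some_iff.mp hf with ⟨k, hk, hkt⟩
  rcases pvMem_enum.mp hp with ⟨j, hj, hi, hc⟩
  have hi' : i = (j : Int) := by omega
  have h1 : k = t.1 := congrArg Prod.fst hkt
  have h2 : c = t.2 := congrArg Prod.snd hkt
  refine ⟨j, hj, ?_, ?_⟩
  · rw [hc]; exact h2
  · rw [← h2, ← h1, ← hi']; exact hk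

theorem pvKeyed_entry {columns : List String} {j : Nat} (hj : j < columns.length)
    {k : Int × Int} (hk : pvKeyB (j : Int) columns[j] = some k) :
    (k, columns[j]) ∈ (PySem.List.enumerate columns 0).filterMap
      (fun p => (pvKeyB p.1 p.2).map (fun k => (k, p.2))) := by
  refine List.mem_filterMap.mpr ⟨((j : Int), columns[j]), ?_, by simp [hk]⟩
  exact pvMem_enum.mpr ⟨j, hj, by omega, rfl⟩

-- if loop1 found nothing, no column is a candidate
theorem pvNo_cand {columns : List String} (h1 : pvLoop1 pvCandidates columns = none)
    {c : String} (hc : c ∈ columns) : pvCandidates.contains c = false := by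
  rw [pvLoop1_eq_find] at h1
  by_contra h
  have hmem : c ∈ pvCandidates := by
    simpa using List.contains_iff_mem.mp (Bool.of_not_eq_false h)
  have h' := List.find?_eq_none.mp h1 c hmem
  exact h' (by simpa using List.contains_iff_mem.mpr hc)

-- CASE 1: a candidate name is present
theorem pvCase1 {columns : List String} {c0 : String}
    (h1 : pvLoop1 pvCandidates columns = some c0) :
    detect_gene_column_alt columns = some c0 := by
  rw [pvLoop1_eq_find] at h1
  rcases List.find?_eq_some_iff_append.mp h1 with ⟨hp0, as, bs, hcs, hpre⟩
  have hp0' : columns.contains c0 = true := hp0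
  have hc0mem : c0 ∈ columns := by simpa using List.contains_iff_mem.mp hp0'
  have hc0pre : c0 ∉ as := by
    intro hin
    have h' := hpre c0 hin
    simp at h'
    exact h' hc0mem
  have hidx0 : PySem.List.index? pvCandidates c0 = some as.length :=
    (PySem.List.index?_eq_some_iff _ _ _).mpr ⟨as, bs, hcs, rfl, hc0pre⟩
  have hcand0 : pvCandidates.contains c0 = true := by
    rw [hcs]; simp
  -- minimality of as.length among indices of candidates present in columns
  have hmin : ∀ (c : String) (n : Nat), c ∈ columns →
      PySem.List.index? pvCandidates c = some n → as.length ≤ n := by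
    intro c n hcmem hidx
    by_contra hlt
    push_neg at hlt
    rcases PySem.List.getElem_of_index?_eq_some hidx with ⟨hn, hget, _⟩
    have e1 := List.getElem_of_eq hcs hn
    have e2 : (as ++ c0 :: bs)[n]'(by simpa [← hcs] using hn) = as[n]'hlt :=
      List.getElem_append_left hlt
    have hcas : as[n]'hlt = c := by rw [← e2, ← e1, hget]
    have h' := hpre _ (hcas ▸ List.getElem_mem hlt)
    simp at h'
    exact h' hcmem
  -- the winning entry
  rcases List.mem_iff_getElem.mp hc0mem with ⟨j0, hj0, hgj0⟩
  have hkey0 : pvKeyB (j0 : Int) columns[j0] = some (0, (as.length : Int)) := by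
    rw [hgj0]
    unfold pvKeyB
    rw [if_pos hcand0, hidx0]
    simp
  have hent := pvKeyed_entry hj0 hkey0
  rw [hgj0] at hent
  -- take the minimum of the keyed list
  rcases pvMin2_spec _ (List.ne_nil_of_mem hent) with ⟨m, hm, hmmem, hmall⟩
  rcases pvKeyed_mem hmmem with ⟨j, hj, hgj, hkj⟩
  have hmc2 : m.2 ∈ columns := hgj ▸ List.getElem_mem hj
  have hle := hmall _ hent
  have hge : pvLe (0, (as.length : Int)) m.1 := by
    rcases pvKeyB_cases hkj with ⟨_, n, hidx, hk⟩ | ⟨_, _, hk⟩ | ⟨_, _, _, hk⟩ <;>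
      rw [hk] <;> unfold pvLe
    · right; refine ⟨rfl, ?_⟩
      show (as.length : Int) ≤ (n : Int)
      exact_mod_cast hmin _ n hmc2 hidx
    · left; show (0 : Int) < 1; decide
    · left; show (0 : Int) < 2; decide
  have hkeq : m.1 = (0, (as.length : Int)) := pvLe_antisymm hle hge
  have hc0 : m.2 = c0 := by
    rcases pvKeyB_cases hkj with ⟨_, n, hidx, hk⟩ | ⟨_, _, hk⟩ | ⟨_, _, _, hk⟩
    · have h2 := (hk.symm.trans hkeq)
      have hn2 : (n : Int) = (as.length : Int) := congrArg Prod.snd h2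
      have hne : n = as.length := by exact_mod_cast hn2
      subst hne
      rcases PySem.List.getElem_of_index?_eq_some hidx with ⟨hlt, hg, _⟩
      rcases PySem.List.getElem_of_index?_eq_some hidx0 with ⟨hlt0, hg0, _⟩
      rw [← hg]
      exact hg0
    · rw [hkeq] at hk
      have h0 := congrArg Prod.fst hk
      simp at h0
    · rw [hkeq] at hk
      have h0 := congrArg Prod.fst hk
      simp at h0
  show (match PySem.List.min2? ((PySem.List.enumerate columns 0).filterMap
      (fun p => (pvKeyB p.1 p.2).map (fun k => (k, p.2)))) (fun t => t.1.1) (fun t => t.1.2) with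
    | some t => some t.2
    | none => none) = some c0
  rw [hm]
  exact congrArg some hc0

-- CASES 2 and 3 share this shape: the first column satisfying P (the whole tier tr) wins
theorem pvCaseFallback {columns : List String} {c1 : String} (tr : Int) (P : String → Bool)
    (hfind : columns.find? P = some c1)
    (hkc : ∀ i : Int, pvKeyB i c1 = some (tr, i))
    (htier : ∀ (i : Int) (c : String) (k : Int × Int), c ∈ columns → pvKeyB i c = some k →
      tr ≤ k.1 ∧ (k.1 = tr → k.2 = i ∧ P c = true)) :
    detect_gene_column_alt columns = some c1 := by
  rcases List.find?_eq_some_iff_append.mp hfind with ⟨hp1, as, bs, hcs, hpre⟩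
  have hj1 : as.length < columns.length := by rw [hcs]; simp
  have hg1 : columns[as.length]'hj1 = c1 := by
    rw [List.getElem_of_eq hcs hj1, List.getElem_append_right (le_refl _)]
    simp
  have hfirst : ∀ (j : Nat) (hjlt : j < as.length), P (columns[j]'(by omega)) = false := by
    intro j hjlt
    have e1 := List.getElem_of_eq hcs (show j < columns.length by omega)
    have e2 : (as ++ c1 :: bs)[j]'(by simpa [← hcs] using (show j < columns.length by omega)) =
        as[j]'hjlt := List.getElem_append_left hjlt
    rw [e1, e2]
    have h' := hpre _ (List.getElem_mem hjlt)
    simpa using h'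
  have hkey1 : pvKeyB (as.length : Int) (columns[as.length]'hj1)
      = some (tr, (as.length : Int)) := by
    rw [hg1]; exact hkc _
  have hent := pvKeyed_entry hj1 hkey1
  rw [hg1] at hent
  rcases pvMin2_spec _ (List.ne_nil_of_mem hent) with ⟨m, hm, hmmem, hmall⟩
  rcases pvKeyed_mem hmmem with ⟨j, hj, hgj, hkj⟩
  have hmc2 : m.2 ∈ columns := hgj ▸ List.getElem_mem hj
  have hle := hmall _ hent
  have hge : pvLe (tr, (as.length : Int)) m.1 := by
    rcases htier _ _ _ hmc2 hkj with ⟨ha, hb⟩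
    by_cases he : m.1.1 = tr
    · have hsnd := (hb he).1
      have hjge : as.length ≤ j := by
        by_contra hlt
        push_neg at hlt
        have hP := (hb he).2
        have := hfirst j hlt
        rw [hgj] at this
        rw [this] at hP
        exact absurd hP (by simp)
      unfold pvLe
      right
      refine ⟨he.symm, ?_⟩
      rw [hsnd]
      show (as.length : Int) ≤ (j : Int)
      exact_mod_cast hjge
    · unfold pvLe
      left
      show tr < m.1.1
      omega
  have hkeq : m.1 = (tr, (as.length : Int)) := pvLe_antisymm hle hge
  have hc1 : m.2 = c1 := by
    rcases htier _ _ _ hmc2 hkj with ⟨_, hb⟩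
    have hsnd := (hb (by rw [hkeq])).1
    rw [hkeq] at hsnd
    have hje : j = as.length := by
      have : ((as.length : Nat) : Int) = (j : Int) := hsnd
      omega
    rw [← hgj]
    subst hje
    exact hg1
  show (match PySem.List.min2? ((PySem.List.enumerate columns 0).filterMap
      (fun p => (pvKeyB p.1 p.2).map (fun k => (k, p.2)))) (fun t => t.1.1) (fun t => t.1.2) with
    | some t => some t.2
    | none => none) = some c1
  rw [hm]
  exact congrArg some hc1

-- CASE 4: nothing matches
theorem pvCase4 {columns : List String}
    (h1 : pvLoop1 pvCandidates columns = none)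
    (h3 : pvLoop3 columns = none) :
    detect_gene_column_alt columns = none := by
  have hempty : (PySem.List.enumerate columns 0).filterMap
      (fun p => (pvKeyB p.1 p.2).map (fun k => (k, p.2))) = [] := by
    rw [List.filterMap_eq_nil_iff]
    rintro ⟨i, c⟩ hp
    rcases pvMem_enum.mp hp with ⟨j, hj, _, hc⟩
    have hcmem : c ∈ columns := hc ▸ List.getElem_mem hj
    have hnc := pvNo_cand h1 hcmem
    rw [pvLoop3_eq_find] at h3
    have hnp3 : pvP3 c = false := Bool.eq_false_iff.mpr (List.find?_eq_none.mp h3 c hcmem)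
    simp only [Option.map_eq_none_iff]
    show pvKeyB i c = none
    have hg : PySem.Str.isIn "gene" (PySem.Str.lower c) = false := by
      unfold pvP3 at hnp3; exact hnp3
    unfold pvKeyB
    rw [if_neg (Bool.eq_false_iff.mp hnc), hg]
    simp
  show (match PySem.List.min2? ((PySem.List.enumerate columns 0).filterMap
      (fun p => (pvKeyB p.1 p.2).map (fun k => (k, p.2)))) (fun t => t.1.1) (fun t => t.1.2) with
    | some t => some t.2
    | none => none) = none
  rw [hempty]
  rfl

theorem pvMain (columns : List String) :
    detect_gene_column columns = detect_gene_column_alt columns := by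
  unfold detect_gene_column
  cases h1 : pvLoop1 pvCandidates columns with
  | some c0 => exact (pvCase1 h1).symm
  | none =>
    cases h2 : pvLoop2 columns with
    | some c1 =>
      have hfind : columns.find? pvP2 = some c1 := by rw [← pvLoop2_eq_find]; exact h2
      have hc1mem : c1 ∈ columns := List.mem_of_find?_eq_some hfind
      have hp2 : pvP2 c1 = true := List.find?_some hfind
      refine (pvCaseFallback 1 pvP2 hfind ?_ ?_).symm
      · intro i
        unfold pvKeyB
        rw [if_neg (Bool.eq_false_iff.mp (pvNo_cand h1 hc1mem))]
        rw [if_pos (show (PySem.Str.isIn "gene" (PySem.Str.lower c1)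
          && PySem.Str.isIn "id" (PySem.Str.lower c1)) = true by unfold pvP2 at hp2; exact hp2)]
      · intro i c k hcmem hk
        rcases pvKeyB_cases hk with ⟨hcand, _, _, _⟩ | ⟨_, hp2c, hkk⟩ | ⟨_, _, _, hkk⟩
        · rw [pvNo_cand h1 hcmem] at hcand
          exact absurd hcand (by simp)
        · subst hkk
          exact ⟨le_refl _, fun _ => ⟨rfl, hp2c⟩⟩
        · subst hkk
          refine ⟨by show (1 : Int) ≤ 2; decide, fun h => ?_⟩
          exfalso
          have h0 : (2 : Int) = 1 := h
          omega
    | none =>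
      cases h3 : pvLoop3 columns with
      | some c2 =>
        have hfind : columns.find? pvP3 = some c2 := by rw [← pvLoop3_eq_find]; exact h3
        have hc2mem : c2 ∈ columns := List.mem_of_find?_eq_some hfind
        have hp3 : pvP3 c2 = true := List.find?_some hfind
        rw [pvLoop2_eq_find] at h2
        have hnp2 : pvP2 c2 = false := Bool.eq_false_iff.mpr (List.find?_eq_none.mp h2 c2 hc2mem)
        refine (pvCaseFallback 2 pvP3 hfind ?_ ?_).symm
        · intro i
          unfold pvKeyB
          rw [if_neg (Bool.eq_false_iff.mp (pvNo_cand h1 hc2mem))]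
          rw [if_neg (show ¬ (PySem.Str.isIn "gene" (PySem.Str.lower c2)
            && PySem.Str.isIn "id" (PySem.Str.lower c2)) = true by
              unfold pvP2 at hnp2; exact Bool.eq_false_iff.mp hnp2)]
          rw [if_pos (show PySem.Str.isIn "gene" (PySem.Str.lower c2) = true by
            unfold pvP3 at hp3; exact hp3)]
        · intro i c k hcmem hk
          rcases pvKeyB_cases hk with ⟨hcand, _, _, _⟩ | ⟨_, hp2c, hkk⟩ | ⟨_, _, hp3c, hkk⟩
          · rw [pvNo_cand h1 hcmem] at hcand
            exact absurd hcand (by simp)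
          · exfalso
            have := Bool.eq_false_iff.mpr (List.find?_eq_none.mp h2 c hcmem)
            rw [hp2c] at this
            exact absurd this (by simp)
          · subst hkk
            exact ⟨le_refl _, fun _ => ⟨rfl, hp3c⟩⟩
      | none => exact (pvCase4 h1 h3).symm

-- ===== VERDICT (by name: the statement is the Claim_ definition above) =====
theorem detect_gene_column_spec : Claim_equal_detect_gene_column := by
  intro columns _
  unfold Spec_detect_gene_column
  exact pvMain columns
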